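-- pv_equiv track=rewrite | github.com/zzaem-zzang/Algorithm | 프로그래머스/1/132267. 콜라 문제/콜라 문제.py | solution
-- ===== SOURCE A (Python) =====
-- def solution(a, b, n):
--     answer = 0
--     while n >= a:
--         newCount = n // a * b
--         leftover = n % a
--
--         answer += newCount
--         n = leftover + newCount
--     return answer
-- ===== SOURCE B (Python) =====
-- def solution(a, b, n):
--     if n < a:
--         return 0
--     return (n - b) // (a - b) * b
-- ===== Notes on version B (the rewrite author's own statement) =====
-- stated objective: simpler
-- what changed: Replaces the exchange-simulation loop with the closed form (n-b)//(a-b)*b (each given bottle consumes a-b bottles net, keeping b as the final change), guarded by n<a -> 0.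
-- outside the precondition, e.g. on solution(1, -13, 2): A returns -26, B returns -13; on solution(2, 2, 5): A does not finish within the time limit, B raises ZeroDivisionError; on solution(0, 1, 3): A raises ZeroDivisionError, B returns -2
import Mathlib
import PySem

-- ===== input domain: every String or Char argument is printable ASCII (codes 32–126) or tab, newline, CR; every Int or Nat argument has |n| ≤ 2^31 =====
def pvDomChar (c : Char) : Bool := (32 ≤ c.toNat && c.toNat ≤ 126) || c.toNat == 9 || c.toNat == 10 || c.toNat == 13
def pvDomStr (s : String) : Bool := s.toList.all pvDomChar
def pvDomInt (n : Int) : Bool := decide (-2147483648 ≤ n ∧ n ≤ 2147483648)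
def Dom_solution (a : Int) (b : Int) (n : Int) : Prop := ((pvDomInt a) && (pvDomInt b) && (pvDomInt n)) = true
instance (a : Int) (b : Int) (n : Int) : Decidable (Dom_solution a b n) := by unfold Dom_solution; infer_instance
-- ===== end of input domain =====

-- B replaces A's exchange-simulation while-loop with the closed form (n-b)//(a-b)*b (simpler: one guarded expression).


-- ===== PORT A =====
-- A's while-loop, with fuel n.toNat + 1; inside Pre_solution every iteration of the
-- running loop strictly decreases n (staying ≥ 0), so the fuel is never exhausted there.
def solutionLoop (a : Int) (b : Int) : Nat → Int → Int → Int
  | 0, answer, _ => answer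
  | fuel + 1, answer, n =>
    if a ≤ n then
      let newCount := PySem.Int.floordiv n a * b
      let leftover := PySem.Int.mod n a
      solutionLoop a b fuel (answer + newCount) (leftover + newCount)
    else answer

def solution (a : Int) (b : Int) (n : Int) : Int :=
  solutionLoop a b (n.toNat + 1) 0 n

-- ===== PORT B =====
def solution_alt (a : Int) (b : Int) (n : Int) : Int :=
  if n < a then 0 else PySem.Int.floordiv (n - b) (a - b) * b

-- ===== PRECONDITION & SPEC =====
-- Pre_ keeps the trivial case n < a and the problem's natural domain 0 ≤ b < a; it excludes
-- b ≥ a with n ≥ a (A loops forever), a = 0 with n ≥ 0 (A raises ZeroDivisionError), and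
-- b < 0 or a ≤ 0 with n ≥ a, which lie outside the bottle-exchange problem's natural domain
-- (negative exchange rates), where A's returned value is an accident of the simulation.
def Pre_solution (a : Int) (b : Int) (n : Int) : Prop := n < a ∨ (0 ≤ b ∧ b < a)
instance (a : Int) (b : Int) (n : Int) : Decidable (Pre_solution a b n) := by
  unfold Pre_solution; infer_instance

def pvWitness_solution : Int × Int × Int := (3, 1, 10)

def Spec_solution (a : Int) (b : Int) (n : Int) (out : Int) : Prop := out = solution_alt a b n
instance (a : Int) (b : Int) (n : Int) (out : Int) : Decidable (Spec_solution a b n out) := by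
  unfold Spec_solution; infer_instance

-- ===== CLAIM (what is proved, stated in full; the proofs are below) =====
def Claim_equal_solution : Prop := ∀ (a : Int) (b : Int) (n : Int), Dom_solution a b n → Pre_solution a b n → Spec_solution a b n (solution a b n)

-- ===== LEMMAS AND PROOFS =====

-- The loop always adds the closed-form value to the accumulator, given enough fuel.
lemma solutionLoop_closed (a b : Int) (hb : 0 ≤ b) (hba : b < a) :
    ∀ (f : Nat) (ans n : Int), n.toNat < f →
      solutionLoop a b f ans n = ans + solution_alt a b n := by
  intro f
  induction f with
  | zero => intro ans n h; omega
  | succ f ih =>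
    intro ans n h
    by_cases hna : a ≤ n
    · have ha : 0 < a := by omega
      have hq1 : 1 ≤ n / a := by
        rw [Int.le_ediv_iff_mul_le ha]; omega
      have hr0 : 0 ≤ n % a := Int.emod_nonneg n (by omega)
      have hra : n % a < a := Int.emod_lt_of_pos n ha
      have hn : a * (n / a) + n % a = n := Int.mul_ediv_add_emod n a
      set q := n / a with hqdef
      set r := n % a with hrdef
      have hfd : PySem.Int.floordiv n a = q := PySem.Int.floordiv_eq_ediv_of_pos ha
      have hmd : PySem.Int.mod n a = r := PySem.Int.mod_eq_emod_of_pos ha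
      have hstep : solutionLoop a b (f + 1) ans n
          = solutionLoop a b f (ans + q * b) (r + q * b) := by
        simp only [solutionLoop, if_pos hna, hfd, hmd]
      -- the next value of n is smaller and still nonnegative
      have hqab : a - b ≤ q * (a - b) := by nlinarith
      have hlt : r + q * b < n := by nlinarith
      have hnn : 0 ≤ r + q * b := by positivity
      have hfuel : (r + q * b).toNat < f := by omega
      rw [hstep, ih (ans + q * b) (r + q * b) hfuel]
      -- arithmetic: alt n = q*b + alt (r + q*b)
      have hab0 : a - b ≠ 0 := by omega
      have hkey : (n - b) / (a - b) = (r + q * b - b) / (a - b) + q := by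
        have hdec : n - b = (r + q * b - b) + q * (a - b) := by ring_nf; linarith [hn]
        rw [hdec, Int.add_mul_ediv_right _ _ hab0]
      have haltn : solution_alt a b n = ((r + q * b - b) / (a - b) + q) * b := by
        unfold solution_alt
        rw [if_neg (by omega), PySem.Int.floordiv_eq_ediv_of_pos (by omega), hkey]
      by_cases hna' : a ≤ r + q * b
      · have : solution_alt a b (r + q * b) = (r + q * b - b) / (a - b) * b := by
          unfold solution_alt
          rw [if_neg (by omega), PySem.Int.floordiv_eq_ediv_of_pos (by omega)]
        rw [this, haltn]; ring
      · have hz : (r + q * b - b) / (a - b) = 0 := by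
          apply Int.ediv_eq_zero_of_lt
          · nlinarith
          · omega
        have : solution_alt a b (r + q * b) = 0 := by
          unfold solution_alt; rw [if_pos (by omega)]
        rw [this, haltn, hz]; ring
    · simp only [solutionLoop, if_neg hna]
      unfold solution_alt
      rw [if_pos (by omega)]
      ring

-- ===== VERDICT (by name: the statement is the Claim_ definition above) =====
theorem solution_spec : Claim_equal_solution := by
  intro a b n _ hpre
  unfold Spec_solution solution
  rcases hpre with hna | ⟨hb, hba⟩
  · simp only [solutionLoop, if_neg (by omega : ¬ a ≤ n)]
    unfold solution_alt
    rw [if_pos hna]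
  · rw [solutionLoop_closed a b hb hba (n.toNat + 1) 0 n (by omega)]
    ring
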